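-- pv_equiv track=rewrite | github.com/mnemox-ai/tradememory-protocol | src/tradememory/strategy_validator.py | _find_contiguous_blocks
-- ===== SOURCE A (Python) =====
-- def _find_contiguous_blocks(sorted_indices: list[int]) -> list[tuple[int, int]]:
--     """Find contiguous blocks in sorted index list."""
--     if not sorted_indices:
--         return []
--     blocks = []
--     block_start = sorted_indices[0]
--     prev = sorted_indices[0]
--     for i in sorted_indices[1:]:
--         if i > prev + 1:
--             blocks.append((block_start, prev))
--             block_start = i
--         prev = i
--     blocks.append((block_start, prev))
--     return blocks
-- ===== SOURCE B (Python) =====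
-- def _find_contiguous_blocks(sorted_indices: list[int]) -> list[tuple[int, int]]:
--     """Two staged passes: first compute the cut positions (indices where a gap
--     of more than 1 separates adjacent elements), then pair consecutive cuts."""
--     xs = sorted_indices
--     if not xs:
--         return []
--     n = len(xs)
--     cuts = [0] + [j for j in range(1, n) if xs[j] > xs[j - 1] + 1] + [n]
--     return [(xs[a], xs[b - 1]) for a, b in zip(cuts, cuts[1:])]
-- ===== Notes on version B (the rewrite author's own statement) =====
-- stated objective: alternative
-- what changed: B replaces A's single stateful pass (block_start/prev accumulators mutated in-flight) by two stateless staged passes over index positions: a comprehension computing the cut positions where adjacent elements differ by more than 1, then a zip of consecutive cuts mapped to (first, last) endpoint pairs.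
import Mathlib
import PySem

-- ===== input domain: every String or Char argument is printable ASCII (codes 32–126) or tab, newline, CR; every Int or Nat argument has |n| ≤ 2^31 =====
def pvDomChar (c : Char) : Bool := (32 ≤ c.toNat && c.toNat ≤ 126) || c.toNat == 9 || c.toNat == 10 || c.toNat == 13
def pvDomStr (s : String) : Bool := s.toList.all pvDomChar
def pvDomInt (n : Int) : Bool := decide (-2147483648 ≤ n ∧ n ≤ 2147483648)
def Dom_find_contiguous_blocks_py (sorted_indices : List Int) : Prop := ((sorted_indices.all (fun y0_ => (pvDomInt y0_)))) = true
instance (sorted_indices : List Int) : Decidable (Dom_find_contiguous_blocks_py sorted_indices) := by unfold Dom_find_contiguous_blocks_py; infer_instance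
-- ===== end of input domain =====

-- B computes the block structure in two staged stateless passes (cut positions, then
-- pairs of consecutive cuts) instead of A's single stateful accumulator pass (same cost).


-- ===== PORT A =====
-- the for-loop over sorted_indices[1:] with state (blocks, block_start, prev)
def fcbLoopA : List Int → List (Int × Int) → Int → Int → List (Int × Int)
  | [], blocks, block_start, prev => blocks ++ [(block_start, prev)]
  | i :: rest, blocks, block_start, prev =>
    if i > prev + 1 then fcbLoopA rest (blocks ++ [(block_start, prev)]) i i
    else fcbLoopA rest blocks block_start i

def find_contiguous_blocks_py (sorted_indices : List Int) : List (Int × Int) :=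
  match sorted_indices with
  | [] => []
  | x :: rest => fcbLoopA rest [] x x

-- ===== PORT B =====
-- the comprehension [j for j in range(1, n) if xs[j] > xs[j-1]+1]
-- (range(1, n) is List.range' 1 (n-1); all indices are in range, so getD is exact)
def fcbGaps (xs : List Int) : List Nat :=
  (List.range' 1 (xs.length - 1)).filter (fun j => decide (xs.getD (j - 1) 0 + 1 < xs.getD j 0))

-- the comprehension [(xs[a], xs[b-1]) for a, b in zip(cuts, cuts[1:])]
def fcbEmit (xs : List Int) (cuts : List Nat) : List (Int × Int) :=
  (cuts.zip cuts.tail).map (fun ab => (xs.getD ab.1 0, xs.getD (ab.2 - 1) 0))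

def find_contiguous_blocks_py_alt (sorted_indices : List Int) : List (Int × Int) :=
  if sorted_indices.isEmpty then []
  else fcbEmit sorted_indices (0 :: (fcbGaps sorted_indices ++ [sorted_indices.length]))

-- ===== PRECONDITION & SPEC =====
def Spec_find_contiguous_blocks_py (sorted_indices : List Int) (out : List (Int × Int)) : Prop := out = find_contiguous_blocks_py_alt sorted_indices
instance (sorted_indices : List Int) (out : List (Int × Int)) : Decidable (Spec_find_contiguous_blocks_py sorted_indices out) := by unfold Spec_find_contiguous_blocks_py; infer_instance

-- ===== CLAIM (what is proved, stated in full; the proofs are below) =====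
def Claim_equal_find_contiguous_blocks_py : Prop := ∀ (sorted_indices : List Int), Dom_find_contiguous_blocks_py sorted_indices → Spec_find_contiguous_blocks_py sorted_indices (find_contiguous_blocks_py sorted_indices)

-- ===== LEMMAS AND PROOFS =====

-- A's loop only ever appends to blocks
lemma fcbLoopA_append (l : List Int) : ∀ (blocks : List (Int × Int)) (bs prev : Int),
    fcbLoopA l blocks bs prev = blocks ++ fcbLoopA l [] bs prev := by
  induction l with
  | nil => intro blocks bs prev; simp [fcbLoopA]
  | cons i rest ih =>
    intro blocks bs prev
    by_cases h : i > prev + 1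
    · simp only [fcbLoopA, if_pos h]
      rw [ih (blocks ++ [(bs, prev)]) i i, ih ([] ++ [(bs, prev)]) i i]
      simp
    · simp only [fcbLoopA, if_neg h]
      exact ih blocks bs i

-- the head of A's output carries block_start; everything else is independent of it
lemma fcbLoopA_head (l : List Int) : ∀ (prev : Int), ∃ e t,
    ∀ bs, fcbLoopA l [] bs prev = (bs, e) :: t := by
  induction l with
  | nil => intro prev; exact ⟨prev, [], fun bs => by simp [fcbLoopA]⟩
  | cons i rest ih =>
    intro prev
    by_cases h : i > prev + 1
    · refine ⟨prev, fcbLoopA rest [] i i, fun bs => ?_⟩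
      simp only [fcbLoopA, if_pos h]
      rw [fcbLoopA_append]
      simp
    · obtain ⟨e, t, he⟩ := ih i
      exact ⟨e, t, fun bs => by simp only [fcbLoopA, if_neg h]; exact he bs⟩

lemma range'_shift (n s : Nat) : List.range' (s + 1) n = (List.range' s n).map (· + 1) := by
  induction n generalizing s with
  | zero => simp
  | succ m ih => simp [List.range'_succ, ih (s + 1)]

-- gap positions of x :: ys in terms of those of ys
lemma fcbGaps_cons (x : Int) (ys : List Int) (hne : ys ≠ []) :
    fcbGaps (x :: ys) =
      (if x + 1 < ys.getD 0 0 then [1] else []) ++ (fcbGaps ys).map (· + 1) := by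
  obtain ⟨y, l, rfl⟩ : ∃ y l, ys = y :: l := by
    cases ys with | nil => exact absurd rfl hne | cons y l => exact ⟨y, l, rfl⟩
  unfold fcbGaps
  simp only [List.length_cons, Nat.add_sub_cancel]
  rw [List.range'_succ, range'_shift]
  simp only [List.filter_cons, List.filter_map]
  have hcong : ∀ j ∈ List.range' 1 l.length,
      (decide ((x :: y :: l).getD (j + 1 - 1) 0 + 1 < (x :: y :: l).getD (j + 1) 0))
        = (decide ((y :: l).getD (j - 1) 0 + 1 < (y :: l).getD j 0)) := by
    intro j hj
    have h1 : 1 ≤ j := (List.mem_range'_1.mp hj).1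
    obtain ⟨k, rfl⟩ : ∃ k, j = k + 1 := ⟨j - 1, by omega⟩
    simp
  simp only [Function.comp_def]
  rw [List.filter_congr hcong]
  by_cases h : x + 1 < y
  · simp [h]
  · simp [h]

-- every cut position in fcbGaps xs ++ [xs.length] is ≥ 1 (for nonempty xs)
lemma fcbCuts_pos (xs : List Int) (hne : xs ≠ []) :
    ∀ b ∈ fcbGaps xs ++ [xs.length], 1 ≤ b := by
  intro b hb
  rcases List.mem_append.mp hb with h | h
  · have := List.mem_of_mem_filter (by unfold fcbGaps at h; exact h)
    exact (List.mem_range'_1.mp this).1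
  · simp only [List.mem_singleton] at h
    subst h
    cases xs with | nil => exact absurd rfl hne | cons _ _ => simp
  
-- shifting every cut by one and prepending an element leaves the emitted pairs unchanged
lemma fcbEmit_shift (x : Int) (ys : List Int) (L : List Nat)
    (hb : ∀ b ∈ L.tail, 1 ≤ b) :
    fcbEmit (x :: ys) (L.map (· + 1)) = fcbEmit ys L := by
  unfold fcbEmit
  have htail : (L.map (· + 1)).tail = L.tail.map (· + 1) := by
    cases L <;> simp
  rw [htail, List.zip_map, List.map_map]
  apply List.map_congr_left
  intro ab hab
  obtain ⟨ha, hbmem⟩ := List.of_mem_zip hab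
  have h1 : 1 ≤ ab.2 := hb ab.2 hbmem
  obtain ⟨a, b⟩ := ab
  simp only [Prod.map, Function.comp]
  obtain ⟨k, rfl⟩ : ∃ k, b = k + 1 := ⟨b - 1, by omega⟩
  simp

-- peeling the first emitted pair off a cut list with at least two cuts
lemma fcbEmit_cons (xs : List Int) (a b : Nat) (r : List Nat) :
    fcbEmit xs (a :: b :: r) = (xs.getD a 0, xs.getD (b - 1) 0) :: fcbEmit xs (b :: r) := by
  unfold fcbEmit
  simp

-- B's unfolding on a two-element-or-more list
lemma fcbAlt_cons (x i : Int) (l : List Int) :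
    (x + 1 < i → find_contiguous_blocks_py_alt (x :: i :: l)
        = (x, x) :: find_contiguous_blocks_py_alt (i :: l)) ∧
    (¬ x + 1 < i → ∀ e t, find_contiguous_blocks_py_alt (i :: l) = (i, e) :: t →
        find_contiguous_blocks_py_alt (x :: i :: l) = (x, e) :: t) := by
  have hg := fcbGaps_cons x (i :: l) (by simp)
  have hpos := fcbCuts_pos (i :: l) (by simp)
  obtain ⟨c, cs, hcs⟩ : ∃ c cs, fcbGaps (i :: l) ++ [(i :: l).length] = c :: cs := by
    cases hG : fcbGaps (i :: l) with
    | nil => exact ⟨(i :: l).length, [], by simp⟩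
    | cons a as => exact ⟨a, as ++ [(i :: l).length], by simp⟩
  have hc1 : 1 ≤ c := hpos c (by rw [hcs]; simp)
  have hcs1 : ∀ b ∈ cs, 1 ≤ b := fun b hb => hpos b (by rw [hcs]; simp [hb])
  obtain ⟨k, rfl⟩ : ∃ k', c = k' + 1 := ⟨c - 1, by omega⟩
  have hshift := fcbEmit_shift x (i :: l) ((k + 1) :: cs) (by simpa using hcs1)
  have hBi : find_contiguous_blocks_py_alt (i :: l)
      = fcbEmit (i :: l) (0 :: (k + 1) :: cs) := by
    unfold find_contiguous_blocks_py_alt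
    rw [if_neg (by simp), hcs]
  have hcuts : fcbGaps (x :: i :: l) ++ [(x :: i :: l).length]
      = (if x + 1 < i then [1] else []) ++ ((k + 1) :: cs).map (· + 1) := by
    rw [hg]
    simp only [List.getD_cons_zero]
    rw [← hcs]
    simp [List.append_assoc]
  constructor
  · intro h
    unfold find_contiguous_blocks_py_alt
    rw [if_neg (by simp), if_neg (by simp), hcuts, if_pos h, hcs]
    have e1 : (0 : Nat) :: ([1] ++ ((k + 1) :: cs).map (· + 1))
        = 0 :: 1 :: ((k + 1) :: cs).map (· + 1) := rfl
    rw [e1, fcbEmit_cons]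
    have e2 : (1 : Nat) :: ((k + 1) :: cs).map (· + 1)
        = (0 :: (k + 1) :: cs).map (· + 1) := by simp
    have hb0 : ∀ b ∈ ((0 : Nat) :: (k + 1) :: cs).tail, 1 ≤ b := by
      intro b hb
      exact hpos b (by rw [hcs]; simpa using hb)
    rw [e2, fcbEmit_shift x (i :: l) (0 :: (k + 1) :: cs) hb0]
    simp
  · intro h e t ht
    rw [hBi, fcbEmit_cons] at ht
    simp only [List.cons.injEq, Prod.mk.injEq, List.getD_cons_zero, Nat.add_sub_cancel] at ht
    obtain ⟨⟨-, he⟩, htt⟩ := ht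
    unfold find_contiguous_blocks_py_alt
    rw [if_neg (by simp), hcuts, if_neg h]
    have e3 : (0 : Nat) :: (([] : List Nat) ++ ((k + 1) :: cs).map (· + 1))
        = 0 :: (k + 1 + 1) :: cs.map (· + 1) := by simp
    rw [e3, fcbEmit_cons]
    have e4 : (k + 1 + 1) :: cs.map (· + 1) = ((k + 1) :: cs).map (· + 1) := by simp
    rw [e4, hshift, ← he, ← htt]
    simp

-- main bridge: A's loop from a singleton state equals B on the whole list
lemma fcb_main (l : List Int) : ∀ x, fcbLoopA l [] x x = find_contiguous_blocks_py_alt (x :: l) := by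
  induction l with
  | nil =>
    intro x
    simp [fcbLoopA, find_contiguous_blocks_py_alt, fcbGaps, fcbEmit]
  | cons i rest ih =>
    intro x
    by_cases h : i > x + 1
    · have := (fcbAlt_cons x i rest).1 h
      rw [this, ← ih i]
      simp only [fcbLoopA, if_pos h]
      rw [fcbLoopA_append]
      simp
    · obtain ⟨e, t, he⟩ := fcbLoopA_head rest i
      have hBi : find_contiguous_blocks_py_alt (i :: rest) = (i, e) :: t := by
        rw [← ih i]; exact he i
      have := (fcbAlt_cons x i rest).2 h e t hBi
      rw [this]
      simp only [fcbLoopA, if_neg h]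
      exact he x

-- ===== VERDICT (by name: the statement is the Claim_ definition above) =====
theorem find_contiguous_blocks_py_spec : Claim_equal_find_contiguous_blocks_py := by
  intro xs _
  unfold Spec_find_contiguous_blocks_py
  cases xs with
  | nil => rfl
  | cons x rest => exact fcb_main rest x
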